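-- pv_equiv track=rewrite | github.com/d0bee/Cos_Pro | cos_0206.py | solution
-- ===== SOURCE A (Python) =====
-- def solution(commands):
-- 	answer = [0,0]
-- 	dx = 0
-- 	dy = 0
-- 	for i in commands:
-- 		if i == 'L':
-- 			dx -= 1
-- 		elif i == 'R' :
-- 			dx += 1
-- 		elif i == 'U':
-- 			dy += 1
-- 		elif i == 'D':
-- 			dy -= 1
-- 	answer[0] = dx
-- 	answer[1] = dy
-- 	return answer
-- ===== SOURCE B (Python) =====
-- def solution(commands):
--     return [commands.count('R') - commands.count('L'),
--             commands.count('U') - commands.count('D')]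
-- ===== Notes on version B (the rewrite author's own statement) =====
-- stated objective: idiomatic
-- what changed: Replaced the per-element branching accumulator loop with direct list.count queries: the result is computed as count('R')-count('L') and count('U')-count('D') with no explicit loop or mutable state.
import Mathlib
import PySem

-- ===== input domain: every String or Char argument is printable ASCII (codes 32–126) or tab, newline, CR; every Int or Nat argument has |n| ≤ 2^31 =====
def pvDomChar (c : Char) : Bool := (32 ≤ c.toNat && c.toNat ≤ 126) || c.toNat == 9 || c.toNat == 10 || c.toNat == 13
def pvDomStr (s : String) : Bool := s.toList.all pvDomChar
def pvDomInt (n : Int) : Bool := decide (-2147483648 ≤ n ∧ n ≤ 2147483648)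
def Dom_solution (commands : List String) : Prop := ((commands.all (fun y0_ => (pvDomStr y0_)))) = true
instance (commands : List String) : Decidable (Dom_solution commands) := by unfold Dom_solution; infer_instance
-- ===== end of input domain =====

-- B replaces the branching accumulator loop with count('R')-count('L') / count('U')-count('D') for clarity; equivalence proved on Dom.


-- ===== PORT A =====
def solution (commands : List String) : List Int :=
  let st := commands.foldl
    (fun (p : Int × Int) i =>
      if i == "L" then (p.1 - 1, p.2)
      else if i == "R" then (p.1 + 1, p.2)
      else if i == "U" then (p.1, p.2 + 1)
      else if i == "D" then (p.1, p.2 - 1)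
      else p)
    (0, 0)
  [st.1, st.2]

-- ===== PORT B =====
def solution_alt (commands : List String) : List Int :=
  [(PySem.List.count commands "R" : Int) - (PySem.List.count commands "L" : Int),
   (PySem.List.count commands "U" : Int) - (PySem.List.count commands "D" : Int)]

-- ===== PRECONDITION & SPEC =====
def Spec_solution (commands : List String) (out : List Int) : Prop := out = solution_alt commands
instance (commands : List String) (out : List Int) : Decidable (Spec_solution commands out) := by unfold Spec_solution; infer_instance

-- ===== CLAIM (what is proved, stated in full; the proofs are below) =====
def Claim_equal_solution : Prop := ∀ (commands : List String), Dom_solution commands → Spec_solution commands (solution commands)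

-- ===== LEMMAS AND PROOFS =====
lemma solution_loop (commands : List String) (dx dy : Int) :
    commands.foldl
      (fun (p : Int × Int) i =>
        if i == "L" then (p.1 - 1, p.2)
        else if i == "R" then (p.1 + 1, p.2)
        else if i == "U" then (p.1, p.2 + 1)
        else if i == "D" then (p.1, p.2 - 1)
        else p)
      (dx, dy)
    = (dx + (PySem.List.count commands "R" : Int) - (PySem.List.count commands "L" : Int),
       dy + (PySem.List.count commands "U" : Int) - (PySem.List.count commands "D" : Int)) := by
  induction commands generalizing dx dy with
  | nil => simp [PySem.List.count_eq]
  | cons c cs ih =>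
    simp only [List.foldl_cons]
    split_ifs with hL hR hU hD <;>
      rw [ih] <;>
      simp_all [PySem.List.count_eq, Prod.ext_iff] <;> omega

-- ===== VERDICT (by name: the statement is the Claim_ definition above) =====
theorem solution_spec : Claim_equal_solution := by
  intro commands _
  unfold Spec_solution solution solution_alt
  rw [solution_loop]
  simp
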